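-- pv_equiv track=rewrite | github.com/OmarUTEC/DataFusionDBll | version2.py | MergeBlocksSimple
-- ===== SOURCE A (Python) =====
-- from collections import defaultdict
--
-- def MergeBlocksSimple(blocks):
--     merged_index = defaultdict(list)
--     for block in blocks:
--         for term, postings in block.items():
--             for posting in postings:
--                 if posting not in merged_index[term]:
--                     merged_index[term].append(posting)
--     return dict(merged_index)
-- ===== SOURCE B (Python) =====
-- from collections import defaultdict
--
-- def MergeBlocksSimple(blocks):
--     # Pass 1: gather all postings per term (duplicates included), skipping
--     # empty postings lists so no empty entries are created.
--     gathered = defaultdict(list)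
--     for block in blocks:
--         for term, postings in block.items():
--             if postings:
--                 gathered[term].extend(postings)
--     # Pass 2: collapse each term's postings to first-occurrence-unique order.
--     return {term: list(dict.fromkeys(postings))
--             for term, postings in gathered.items()}
-- ===== Notes on version B (the rewrite author's own statement) =====
-- stated objective: faster
-- what changed: A checks 'posting not in merged[term]' on every single posting while merging; B separates the work into two passes: first concatenate all postings per term with extend, then deduplicate each term's list once with dict.fromkeys (hash-based), removing the per-posting list membership scan.
import Mathlib
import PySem

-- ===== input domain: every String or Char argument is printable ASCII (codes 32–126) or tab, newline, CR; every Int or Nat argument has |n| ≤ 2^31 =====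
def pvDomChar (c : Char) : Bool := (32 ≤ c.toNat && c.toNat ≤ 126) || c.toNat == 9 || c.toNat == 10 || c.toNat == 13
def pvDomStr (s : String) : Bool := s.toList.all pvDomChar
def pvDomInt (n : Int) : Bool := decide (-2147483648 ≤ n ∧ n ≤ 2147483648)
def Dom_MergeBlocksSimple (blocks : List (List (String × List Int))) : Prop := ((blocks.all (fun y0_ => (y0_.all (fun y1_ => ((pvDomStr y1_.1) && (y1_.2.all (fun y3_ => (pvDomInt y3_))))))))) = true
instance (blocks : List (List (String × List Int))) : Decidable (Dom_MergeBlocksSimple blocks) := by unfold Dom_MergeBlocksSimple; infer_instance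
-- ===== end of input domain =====

-- B replaces A's per-posting membership scan of merged[term] with two passes:
-- gather all postings per term by concatenation, then deduplicate each term's
-- list once (first-occurrence order). Equivalence of return values is proved.

-- ===== PORT A =====
-- 'if posting not in merged_index[term]: merged_index[term].append(posting)'.
-- The defaultdict access creates the entry on first touch; that creation is
-- observable only through the final dict, and whenever the key is absent the
-- membership test fails (posting ∉ []) so the same step inserts the entry.
def pvAStep (d : PySem.Dict String (List Int)) (t : String) (p : Int) :
    PySem.Dict String (List Int) :=
  let cur := d.getD t []
  if p ∈ cur then d else d.insert t (cur ++ [p])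

-- the inner 'for posting in postings' loop for one (term, postings) item
def pvAItem (d : PySem.Dict String (List Int)) (tp : String × List Int) :
    PySem.Dict String (List Int) :=
  tp.2.foldl (fun d p => pvAStep d tp.1 p) d

def MergeBlocksSimple (blocks : List (List (String × List Int))) : List (String × List Int) :=
  (blocks.foldl (fun d block => block.foldl pvAItem d) PySem.Dict.empty).items

-- ===== PORT B =====
-- 'if postings: gathered[term].extend(postings)' for one item
def pvBItem (d : PySem.Dict String (List Int)) (tp : String × List Int) :
    PySem.Dict String (List Int) :=
  if tp.2.isEmpty then d else d.insert tp.1 (d.getD tp.1 [] ++ tp.2)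

-- pass 1: gather; pass 2: 'list(dict.fromkeys(postings))' = first-occurrence
-- distinct order = PySem.Set.ofList
def MergeBlocksSimple_alt (blocks : List (List (String × List Int))) : List (String × List Int) :=
  ((blocks.foldl (fun d block => block.foldl pvBItem d) PySem.Dict.empty).items).map
    (fun p => (p.1, PySem.Set.ofList p.2))

-- ===== PRECONDITION & SPEC =====
def Spec_MergeBlocksSimple (blocks : List (List (String × List Int))) (out : List (String × List Int)) : Prop := out = MergeBlocksSimple_alt blocks
instance (blocks : List (List (String × List Int))) (out : List (String × List Int)) : Decidable (Spec_MergeBlocksSimple blocks out) := by unfold Spec_MergeBlocksSimple; infer_instance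

-- ===== CLAIM (what is proved, stated in full; the proofs are below) =====
def Claim_equal_MergeBlocksSimple : Prop := ∀ (blocks : List (List (String × List Int))), Dom_MergeBlocksSimple blocks → Spec_MergeBlocksSimple blocks (MergeBlocksSimple blocks)

-- ===== LEMMAS AND PROOFS =====

-- value-mapping a dict (deduplicate every value, first-occurrence order)
def pvMapVal (d : PySem.Dict String (List Int)) : PySem.Dict String (List Int) :=
  PySem.Dict.mk (d.items.map (fun p => (p.1, PySem.Set.ofList p.2)))

theorem pvMapVal_contains (d : PySem.Dict String (List Int)) (t : String) :
    (pvMapVal d).contains t = d.contains t := by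
  simp only [pvMapVal, PySem.Dict.contains, PySem.Dict.items, List.any_map]
  rfl

theorem pvMapVal_keys (d : PySem.Dict String (List Int)) :
    (pvMapVal d).keys = d.keys := by
  simp only [pvMapVal, PySem.Dict.keys, PySem.Dict.items, List.map_map]
  rfl

theorem pvMapVal_get? (d : PySem.Dict String (List Int)) (t : String) :
    (pvMapVal d).get? t = (d.get? t).map PySem.Set.ofList := by
  obtain ⟨l⟩ := d
  induction l with
  | nil => simp [pvMapVal, PySem.Dict.get?]
  | cons hd tl ih =>
    simp only [pvMapVal, PySem.Dict.items, List.map_cons] at *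
    rw [PySem.Dict.get?_mk_cons, PySem.Dict.get?_mk_cons]
    by_cases h : (hd.1 == t) = true
    · simp [h]
    · simp only [h, Bool.false_eq_true, ite_false]
      exact ih

theorem pvMapVal_insert (d : PySem.Dict String (List Int)) (t : String) (v : List Int) :
    pvMapVal (d.insert t v) = (pvMapVal d).insert t (PySem.Set.ofList v) := by
  by_cases h : d.contains t = true
  · rw [PySem.Dict.insert, if_pos h, PySem.Dict.insert,
      if_pos (by rw [pvMapVal_contains]; exact h)]
    unfold pvMapVal
    congr 1
    simp only [PySem.Dict.items, List.map_map]
    apply List.map_congr_left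
    intro p _
    by_cases hp : (p.1 == t) = true <;> simp [Function.comp, hp]
  · rw [PySem.Dict.insert, if_neg h, PySem.Dict.insert,
      if_neg (by rw [pvMapVal_contains]; exact h)]
    unfold pvMapVal
    congr 1
    simp [PySem.Dict.items]

theorem pvContains_of_get? (d : PySem.Dict String (List Int)) (t : String)
    (v : List Int) (h : d.get? t = some v) : d.contains t = true := by
  unfold PySem.Dict.get? at h
  cases hf : d.items.find? (fun p => p.1 == t) with
  | none => rw [hf] at h; simp at h
  | some p =>
    have hm := List.mem_of_find?_eq_some hf
    have hp := List.find?_some hf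
    simp only [PySem.Dict.contains, List.any_eq_true]
    exact ⟨p, hm, hp⟩

-- inserting the value already stored at a key (unique keys) changes nothing
theorem pvInsert_idem (l : List (String × List Int)) (t : String) (v : List Int)
    (hnd : (l.map Prod.fst).Nodup)
    (h : (PySem.Dict.mk l).get? t = some v) :
    (PySem.Dict.mk l).insert t v = PySem.Dict.mk l := by
  induction l with
  | nil => simp [PySem.Dict.get?] at h
  | cons hd tl ih =>
    rw [PySem.Dict.get?_mk_cons] at h
    simp only [List.map_cons, List.nodup_cons] at hnd
    by_cases he : (hd.1 == t) = true
    · have ht : hd.1 = t := by simpa using he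
      simp only [he, if_pos, Option.some.injEq] at h
      have hc : (PySem.Dict.mk (hd :: tl)).contains t = true := by
        simp only [PySem.Dict.contains, PySem.Dict.items, List.any_cons, Bool.or_eq_true]
        exact Or.inl he
      rw [PySem.Dict.insert, if_pos hc]
      congr 1
      simp only [PySem.Dict.items, List.map_cons, he, if_pos]
      have htl : List.map (fun p => if (p.1 == t) = true then (t, v) else p) tl = tl := by
        conv_rhs => rw [← List.map_id tl]
        apply List.map_congr_left
        intro p hp
        have hne : ¬ (p.1 == t) = true := by
          simp only [beq_iff_eq]
          intro e
          exact hnd.1 (by rw [ht]; exact e ▸ List.mem_map_of_mem hp)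
        simp [hne]
      rw [htl, ← ht, ← h]
    · simp only [he, Bool.false_eq_true, ite_false] at h
      have hc2 := pvContains_of_get? (PySem.Dict.mk tl) t v h
      have hc : (PySem.Dict.mk (hd :: tl)).contains t = true := by
        simp only [PySem.Dict.contains, PySem.Dict.items, List.any_cons, Bool.or_eq_true]
        exact Or.inr (by simpa [PySem.Dict.contains] using hc2)
      rw [PySem.Dict.insert, if_pos hc]
      have hmap := ih hnd.2 h
      rw [PySem.Dict.insert, if_pos hc2] at hmap
      have hmap' : List.map (fun p => if (p.1 == t) = true then (t, v) else p) tl = tl := by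
        have := congrArg PySem.Dict.items hmap
        simpa [PySem.Dict.items] using this
      congr 1
      simp only [PySem.Dict.items, List.map_cons, he, Bool.false_eq_true, ite_false, hmap']

-- the inner posting loop of A, once the key is present with value cur
theorem pvALoop (ps : List Int) :
    ∀ (e : PySem.Dict String (List Int)) (t : String) (cur : List Int),
    e.keys.Nodup → e.get? t = some cur →
    ps.foldl (fun d p => pvAStep d t p) e = e.insert t (PySem.Set.update cur ps) := by
  induction ps with
  | nil =>
    intro e t cur hnd h
    simp only [List.foldl_nil, PySem.Set.update]
    obtain ⟨l⟩ := e
    exact (pvInsert_idem l t cur (by simpa [PySem.Dict.keys, PySem.Dict.items] using hnd) h).symm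
  | cons p ps ih =>
    intro e t cur hnd h
    have hget : e.getD t [] = cur := PySem.Dict.getD_of_get?_eq_some _ [] h
    have hstep : pvAStep e t p = if p ∈ cur then e else e.insert t (cur ++ [p]) := by
      unfold pvAStep; rw [hget]
    simp only [List.foldl_cons, PySem.Set.update_cons, hstep]
    by_cases hp : p ∈ cur
    · have hadd : PySem.Set.add cur p = cur := by
        simp [PySem.Set.add, hp]
      rw [if_pos hp, hadd]
      exact ih e t cur hnd h
    · have hadd : PySem.Set.add cur p = cur ++ [p] := by
        simp [PySem.Set.add, hp]
      rw [if_neg hp, hadd]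
      rw [ih (e.insert t (cur ++ [p])) t (cur ++ [p])
        (PySem.Dict.nodup_keys_insert e t (cur ++ [p]) hnd)
        (PySem.Dict.get?_insert_self e t (cur ++ [p]))]
      rw [PySem.Dict.insert_insert_self]

-- one (term, postings) item preserves the 'A-dict = dedup of B-dict' relation
theorem pvStep_main (d : PySem.Dict String (List Int)) (tp : String × List Int)
    (hnd : d.keys.Nodup) :
    pvAItem (pvMapVal d) tp = pvMapVal (pvBItem d tp) := by
  obtain ⟨t, ps⟩ := tp
  unfold pvAItem pvBItem
  cases ps with
  | nil => simp
  | cons p ps' =>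
    simp only [List.isEmpty_cons, Bool.false_eq_true, ite_false]
    rw [pvMapVal_insert]
    have hnd' : (pvMapVal d).keys.Nodup := by rw [pvMapVal_keys]; exact hnd
    cases hg : d.get? t with
    | some cur =>
      have hgm : (pvMapVal d).get? t = some (PySem.Set.ofList cur) := by
        rw [pvMapVal_get?, hg]; rfl
      rw [pvALoop _ _ _ _ hnd' hgm]
      congr 1
      rw [PySem.Dict.getD_of_get?_eq_some _ [] hg, PySem.Set.ofList_append]
    | none =>
      have hgm : (pvMapVal d).get? t = none := by rw [pvMapVal_get?, hg]; rfl
      have hgd : (pvMapVal d).getD t [] = [] := by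
        rw [PySem.Dict.getD_eq_get?_getD, hgm]; rfl
      have hgd' : d.getD t [] = [] := by
        rw [PySem.Dict.getD_eq_get?_getD, hg]; rfl
      have h1 : pvAStep (pvMapVal d) t p = (pvMapVal d).insert t [p] := by
        unfold pvAStep; rw [hgd]; simp
      simp only [List.foldl_cons, h1]
      rw [pvALoop ps' ((pvMapVal d).insert t [p]) t [p]
        (PySem.Dict.nodup_keys_insert _ t [p] hnd')
        (PySem.Dict.get?_insert_self _ t [p])]
      rw [PySem.Dict.insert_insert_self]
      congr 1
      rw [hgd']
      simp [PySem.Set.ofList, PySem.Set.update, PySem.Set.add, PySem.Set.empty]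

theorem pvNodup_B (d : PySem.Dict String (List Int)) (tp : String × List Int)
    (hnd : d.keys.Nodup) : (pvBItem d tp).keys.Nodup := by
  unfold pvBItem
  split
  · exact hnd
  · exact PySem.Dict.nodup_keys_insert _ _ _ hnd

theorem pvMain (items : List (String × List Int)) :
    ∀ (d : PySem.Dict String (List Int)), d.keys.Nodup →
    items.foldl pvAItem (pvMapVal d) = pvMapVal (items.foldl pvBItem d) := by
  induction items with
  | nil => intro d _; rfl
  | cons tp rest ih =>
    intro d hnd
    simp only [List.foldl_cons]
    rw [pvStep_main d tp hnd]
    exact ih _ (pvNodup_B d tp hnd)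

-- ===== VERDICT (by name: the statement is the Claim_ definition above) =====
theorem MergeBlocksSimple_spec : Claim_equal_MergeBlocksSimple := by
  intro blocks _
  unfold Spec_MergeBlocksSimple MergeBlocksSimple MergeBlocksSimple_alt
  rw [← List.foldl_flatten, ← List.foldl_flatten]
  have h := pvMain blocks.flatten PySem.Dict.empty
    (by simp [PySem.Dict.empty, PySem.Dict.keys, PySem.Dict.items])
  have he : pvMapVal PySem.Dict.empty = PySem.Dict.empty := by rfl
  rw [he] at h
  rw [h]
  rfl
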